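-- pv_equiv track=rewrite | github.com/nicholasfl/Portfolio | nicholas/side_projects/bioinformatics/MSS.py | mod_MSS_naive
-- ===== SOURCE A (Python) =====
-- def mod_MSS_naive(a,n):
--     max_score = 0
--     results = []
--     l = 1
--     r = 0
--     array_additions = 0
--     for i in range(n):
--         for j in range(i,n+1):
--             s = 0
--             for k in range(i,j):
--                 s = s + a[k]
--                 array_additions += 1
--             if (s > max_score):
--                 max_score = s
--                 l = i
--                 r = j
--     global_max_score = max_score
--     for i in range(n):
--         for j in range(i,n+1):
--             s = 0
--             for k in range(i,j):
--                 s = s + a[k]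
--                 array_additions += 1
--             if (s == global_max_score):
--                 results.append(i)
--                 results.append(j-1)
--
--     return(results,global_max_score)
-- ===== SOURCE B (Python) =====
-- def mod_MSS_naive(a, n):
--     # Prefix sums: P[m] = a[0]+...+a[m-1], so sum(a[i:j]) = P[j]-P[i] in O(1).
--     P = [0]
--     t = 0
--     for k in range(n):
--         t += a[k]
--         P.append(t)
--     best = 0
--     for i in range(n):
--         for j in range(i, n + 1):
--             if P[j] - P[i] > best:
--                 best = P[j] - P[i]
--     results = []
--     for i in range(n):
--         for j in range(i, n + 1):
--             if P[j] - P[i] == best: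
--                 results.append(i)
--                 results.append(j - 1)
--     return (results, best)
-- ===== Notes on version B (the rewrite author's own statement) =====
-- stated objective: faster
-- what changed: B precomputes prefix sums once so each subarray sum is a single subtraction, removing A's innermost summation loop from both quadratic passes (O(n^3) -> O(n^2)).
import Mathlib
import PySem

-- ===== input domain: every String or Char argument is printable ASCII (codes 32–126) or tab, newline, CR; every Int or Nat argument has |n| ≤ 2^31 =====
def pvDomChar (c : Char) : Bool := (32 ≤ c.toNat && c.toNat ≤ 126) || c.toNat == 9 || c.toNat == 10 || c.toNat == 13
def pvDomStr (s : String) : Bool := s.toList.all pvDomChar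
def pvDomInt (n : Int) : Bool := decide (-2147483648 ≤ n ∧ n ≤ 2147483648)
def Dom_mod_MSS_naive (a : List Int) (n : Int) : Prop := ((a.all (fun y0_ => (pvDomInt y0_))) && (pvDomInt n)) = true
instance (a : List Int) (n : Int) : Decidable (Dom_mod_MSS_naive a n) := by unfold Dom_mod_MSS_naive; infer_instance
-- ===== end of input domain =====

-- B replaces A's innermost summation loop by prefix sums (each subarray sum becomes one
-- subtraction), keeping the same two quadratic scans; return values are proved equal on Pre_.

-- ===== PORT A =====
-- first pass: state (max_score, l, r, array_additions); inner sum carries (s, array_additions)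
def aPass1 (a : List Int) (n : Int) : Int × Int × Int × Int :=
  (PySem.List.pyRange 0 n).foldl (fun st i =>
    (PySem.List.pyRange i (n+1)).foldl (fun st j =>
      let sa := (PySem.List.pyRange i j).foldl
        (fun (sa : Int × Int) k => (sa.1 + PySem.List.pyGetD a k 0, sa.2 + 1)) (0, st.2.2.2)
      if sa.1 > st.1 then (sa.1, i, j, sa.2) else (st.1, st.2.1, st.2.2.1, sa.2)) st)
    (0, 1, 0, 0)

-- second pass: state (results, array_additions); gv = global_max_score
def aPass2 (a : List Int) (n : Int) (gv : Int) (adds : Int) : List Int × Int :=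
  (PySem.List.pyRange 0 n).foldl (fun st i =>
    (PySem.List.pyRange i (n+1)).foldl (fun st j =>
      let sa := (PySem.List.pyRange i j).foldl
        (fun (sa : Int × Int) k => (sa.1 + PySem.List.pyGetD a k 0, sa.2 + 1)) (0, st.2)
      if sa.1 = gv then (st.1 ++ [i, j - 1], sa.2) else (st.1, sa.2)) st)
    ([], adds)

def mod_MSS_naive (a : List Int) (n : Int) : List Int × Int :=
  let p1 := aPass1 a n
  let p2 := aPass2 a n p1.1 p1.2.2.2
  (p2.1, p1.1)

-- ===== PORT B =====
-- P = [0]; for k in range(n): t += a[k]; P.append(t)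
def bPrefix (a : List Int) (n : Int) : List Int :=
  ((PySem.List.pyRange 0 n).foldl (fun (pt : List Int × Int) k =>
      let t := pt.2 + PySem.List.pyGetD a k 0
      (pt.1 ++ [t], t)) ([0], 0)).1

def bBest (P : List Int) (n : Int) : Int :=
  (PySem.List.pyRange 0 n).foldl (fun b i =>
    (PySem.List.pyRange i (n+1)).foldl (fun b j =>
      if PySem.List.pyGetD P j 0 - PySem.List.pyGetD P i 0 > b
      then PySem.List.pyGetD P j 0 - PySem.List.pyGetD P i 0 else b) b) 0

def bResults (P : List Int) (n : Int) (best : Int) : List Int :=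
  (PySem.List.pyRange 0 n).foldl (fun rs i =>
    (PySem.List.pyRange i (n+1)).foldl (fun rs j =>
      if PySem.List.pyGetD P j 0 - PySem.List.pyGetD P i 0 = best
      then rs ++ [i, j - 1] else rs) rs) []

def mod_MSS_naive_alt (a : List Int) (n : Int) : List Int × Int :=
  let P := bPrefix a n
  let best := bBest P n
  (bResults P n best, best)

-- ===== PRECONDITION & SPEC =====
-- Pre_ excludes exactly the inputs where both Pythons raise IndexError: n > len(a)
-- (a[k] is read for k in range(n)).
def Pre_mod_MSS_naive (a : List Int) (n : Int) : Prop := n ≤ (a.length : Int)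
instance (a : List Int) (n : Int) : Decidable (Pre_mod_MSS_naive a n) := by
  unfold Pre_mod_MSS_naive; infer_instance
def pvWitness_mod_MSS_naive : List Int × Int := ([1, -2, 3], 3)

def Spec_mod_MSS_naive (a : List Int) (n : Int) (out : List Int × Int) : Prop := out = mod_MSS_naive_alt a n
instance (a : List Int) (n : Int) (out : List Int × Int) : Decidable (Spec_mod_MSS_naive a n out) := by unfold Spec_mod_MSS_naive; infer_instance

-- ===== CLAIM (what is proved, stated in full; the proofs are below) =====
def Claim_equal_mod_MSS_naive : Prop := ∀ (a : List Int) (n : Int), Dom_mod_MSS_naive a n → Pre_mod_MSS_naive a n → Spec_mod_MSS_naive a n (mod_MSS_naive a n)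

-- ===== LEMMAS AND PROOFS =====

-- sum of a[i:j] as A computes it (as a map-sum)
def mSum (a : List Int) (i j : Int) : Int :=
  ((PySem.List.pyRange i j).map (fun k => PySem.List.pyGetD a k 0)).sum

-- A's innermost (s, array_additions) loop: the s component is the map-sum
lemma innerA_fst (a : List Int) (L : List Int) (s c : Int) :
    (L.foldl (fun (sa : Int × Int) k => (sa.1 + PySem.List.pyGetD a k 0, sa.2 + 1)) (s, c)).1
      = s + (L.map (fun k => PySem.List.pyGetD a k 0)).sum := by
  induction L generalizing s c with
  | nil => simp
  | cons x xs ih => simp [ih, add_assoc]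

-- the max-score loop with the bookkeeping state projected away
def aMax (a : List Int) (n : Int) : Int :=
  (PySem.List.pyRange 0 n).foldl (fun m i =>
    (PySem.List.pyRange i (n+1)).foldl (fun m j =>
      if mSum a i j > m then mSum a i j else m) m) 0

-- the results loop with the bookkeeping state projected away
def aRes (a : List Int) (n : Int) (gv : Int) : List Int :=
  (PySem.List.pyRange 0 n).foldl (fun rs i =>
    (PySem.List.pyRange i (n+1)).foldl (fun rs j =>
      if mSum a i j = gv then rs ++ [i, j - 1] else rs) rs) []

lemma p1_inner (a : List Int) (i : Int) (L : List Int) (st : Int × Int × Int × Int) :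
    (L.foldl (fun st j =>
        let sa := (PySem.List.pyRange i j).foldl
          (fun (sa : Int × Int) k => (sa.1 + PySem.List.pyGetD a k 0, sa.2 + 1)) (0, st.2.2.2)
        if sa.1 > st.1 then (sa.1, i, j, sa.2) else (st.1, st.2.1, st.2.2.1, sa.2)) st).1
      = L.foldl (fun m j => if mSum a i j > m then mSum a i j else m) st.1 := by
  induction L generalizing st with
  | nil => rfl
  | cons x xs ih =>
      rw [List.foldl_cons, List.foldl_cons, ih]
      congr 1
      simp only [innerA_fst, zero_add, mSum]
      split_ifs <;> rfl

lemma p1_outer (a : List Int) (n : Int) (L : List Int) (st : Int × Int × Int × Int) :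
    (L.foldl (fun st i =>
      (PySem.List.pyRange i (n+1)).foldl (fun st j =>
        let sa := (PySem.List.pyRange i j).foldl
          (fun (sa : Int × Int) k => (sa.1 + PySem.List.pyGetD a k 0, sa.2 + 1)) (0, st.2.2.2)
        if sa.1 > st.1 then (sa.1, i, j, sa.2) else (st.1, st.2.1, st.2.2.1, sa.2)) st) st).1
      = L.foldl (fun m i =>
          (PySem.List.pyRange i (n+1)).foldl (fun m j =>
            if mSum a i j > m then mSum a i j else m) m) st.1 := by
  induction L generalizing st with
  | nil => rfl
  | cons x xs ih =>
      rw [List.foldl_cons, List.foldl_cons, ih, p1_inner]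

lemma aPass1_fst (a : List Int) (n : Int) : (aPass1 a n).1 = aMax a n :=
  p1_outer a n (PySem.List.pyRange 0 n) (0, 1, 0, 0)

lemma p2_inner (a : List Int) (i gv : Int) (L : List Int) (st : List Int × Int) :
    (L.foldl (fun st j =>
        let sa := (PySem.List.pyRange i j).foldl
          (fun (sa : Int × Int) k => (sa.1 + PySem.List.pyGetD a k 0, sa.2 + 1)) (0, st.2)
        if sa.1 = gv then (st.1 ++ [i, j - 1], sa.2) else (st.1, sa.2)) st).1
      = L.foldl (fun rs j => if mSum a i j = gv then rs ++ [i, j - 1] else rs) st.1 := by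
  induction L generalizing st with
  | nil => rfl
  | cons x xs ih =>
      rw [List.foldl_cons, List.foldl_cons, ih]
      congr 1
      simp only [innerA_fst, zero_add, mSum]
      split_ifs <;> rfl

lemma p2_outer (a : List Int) (n gv : Int) (L : List Int) (st : List Int × Int) :
    (L.foldl (fun st i =>
      (PySem.List.pyRange i (n+1)).foldl (fun st j =>
        let sa := (PySem.List.pyRange i j).foldl
          (fun (sa : Int × Int) k => (sa.1 + PySem.List.pyGetD a k 0, sa.2 + 1)) (0, st.2)
        if sa.1 = gv then (st.1 ++ [i, j - 1], sa.2) else (st.1, sa.2)) st) st).1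
      = L.foldl (fun rs i =>
          (PySem.List.pyRange i (n+1)).foldl (fun rs j =>
            if mSum a i j = gv then rs ++ [i, j - 1] else rs) rs) st.1 := by
  induction L generalizing st with
  | nil => rfl
  | cons x xs ih =>
      rw [List.foldl_cons, List.foldl_cons, ih, p2_inner]

lemma aPass2_fst (a : List Int) (n gv adds : Int) : (aPass2 a n gv adds).1 = aRes a n gv :=
  p2_outer a n gv (PySem.List.pyRange 0 n) ([], adds)

-- ---- B-side characterisation ----

-- running prefix list produced by B's first loop
def prefList (a : List Int) : List Int → Int → List Int
  | [], _ => []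
  | k :: ks, t => (t + PySem.List.pyGetD a k 0) :: prefList a ks (t + PySem.List.pyGetD a k 0)

lemma build_spec (a : List Int) (L : List Int) (acc : List Int) (t : Int) :
    L.foldl (fun (pt : List Int × Int) k =>
        let t' := pt.2 + PySem.List.pyGetD a k 0
        (pt.1 ++ [t'], t')) (acc, t)
      = (acc ++ prefList a L t, t + (L.map (fun k => PySem.List.pyGetD a k 0)).sum) := by
  induction L generalizing acc t with
  | nil => simp [prefList]
  | cons x xs ih => simp [prefList, ih, add_assoc]

lemma bPrefix_eq (a : List Int) (n : Int) :
    bPrefix a n = 0 :: prefList a (PySem.List.pyRange 0 n) 0 := by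
  unfold bPrefix
  rw [build_spec]
  rfl

lemma prefList_getElem? (a : List Int) (L : List Int) (t : Int) (q : Nat) (h : q < L.length) :
    (prefList a L t)[q]? = some (t + ((L.take (q+1)).map (fun k => PySem.List.pyGetD a k 0)).sum) := by
  induction L generalizing t q with
  | nil => simp at h
  | cons x xs ih =>
      cases q with
      | zero => simp [prefList]
      | succ q' =>
          simp only [prefList, List.getElem?_cons_succ, List.take_succ_cons, List.map_cons,
            List.sum_cons]
          rw [ih _ _ (by simpa using h)]
          simp [add_assoc]

lemma prefList_length (a : List Int) (L : List Int) (t : Int) :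
    (prefList a L t).length = L.length := by
  induction L generalizing t with
  | nil => rfl
  | cons x xs ih => simp [prefList, ih]

-- P[m] = sum(a[0:m]) for 0 ≤ m ≤ n (inside Pre_)
lemma bPrefix_get (a : List Int) (n m : Int) (h0 : 0 ≤ m) (h1 : m ≤ n) :
    PySem.List.pyGetD (bPrefix a n) m 0 = mSum a 0 m := by
  have hn : 0 ≤ n := le_trans h0 h1
  have hN : n = ((n.toNat : Nat) : Int) := by omega
  have hM : m = ((m.toNat : Nat) : Int) := by omega
  rw [bPrefix_eq]
  have hlen2 : (prefList a (PySem.List.pyRange 0 n) 0).length = n.toNat := by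
    rw [hN, PySem.List.pyRange_zero_natCast]; simp [prefList_length]; omega
  rw [PySem.List.pyGetD_eq_getElem _ _ h0 (by simp [hlen2]; omega)]
  rw [← Option.some_inj, ← List.getElem?_eq_getElem]
  rcases Nat.eq_zero_or_pos m.toNat with hq | hq
  · have hm : m = 0 := by omega
    subst hm
    simp [hq, mSum, show PySem.List.pyRange 0 0 = [] from rfl]
  · obtain ⟨q, hq'⟩ : ∃ q, m.toNat = q + 1 := ⟨m.toNat - 1, by omega⟩
    rw [hq', List.getElem?_cons_succ,
      prefList_getElem? _ _ _ q (by rw [hN, PySem.List.pyRange_zero_natCast]; simp; omega)]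
    have htake : (PySem.List.pyRange 0 n).take (q+1) = PySem.List.pyRange 0 m := by
      rw [hN, hM, PySem.List.pyRange_zero_natCast, PySem.List.pyRange_zero_natCast,
        ← List.map_take, List.take_range]
      have hmin : min (q+1) n.toNat = m.toNat := by omega
      rw [hmin]
    rw [htake]
    simp [mSum]

-- telescoping: sum(a[i:j]) = P[j] - P[i]
lemma prefix_diff (a : List Int) (n i j : Int) (h0 : 0 ≤ i) (hij : i ≤ j) (hjn : j ≤ n) :
    PySem.List.pyGetD (bPrefix a n) j 0 - PySem.List.pyGetD (bPrefix a n) i 0 = mSum a i j := by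
  rw [bPrefix_get a n i h0 (le_trans hij hjn), bPrefix_get a n j (le_trans h0 hij) hjn]
  have hsplit : PySem.List.pyRange 0 j = PySem.List.pyRange 0 i ++ PySem.List.pyRange i j :=
    PySem.List.pyRange_one_append 0 i j h0 hij
  simp only [mSum, hsplit, List.map_append, List.sum_append]
  ring

lemma bBest_eq (a : List Int) (n : Int) : bBest (bPrefix a n) n = aMax a n := by
  unfold bBest aMax
  apply PySem.List.foldl_congr_mem
  intro acc i hi
  apply PySem.List.foldl_congr_mem
  intro acc2 j hj
  have hi' := PySem.List.mem_pyRange_one.mp hi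
  have hj' := PySem.List.mem_pyRange_one.mp hj
  rw [prefix_diff a n i j hi'.1 hj'.1 (by omega)]

lemma bResults_eq (a : List Int) (n gv : Int) : bResults (bPrefix a n) n gv = aRes a n gv := by
  unfold bResults aRes
  apply PySem.List.foldl_congr_mem
  intro acc i hi
  apply PySem.List.foldl_congr_mem
  intro acc2 j hj
  have hi' := PySem.List.mem_pyRange_one.mp hi
  have hj' := PySem.List.mem_pyRange_one.mp hj
  rw [prefix_diff a n i j hi'.1 hj'.1 (by omega)]

-- ===== VERDICT (by name: the statement is the Claim_ definition above) =====
theorem mod_MSS_naive_spec : Claim_equal_mod_MSS_naive := by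
  intro a n _ _
  unfold Spec_mod_MSS_naive mod_MSS_naive mod_MSS_naive_alt
  simp only [aPass1_fst, aPass2_fst, bBest_eq, bResults_eq]
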